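-- pv_equiv track=rewrite | github.com/fisher458/TwiceSignal | src/signaltwice/strategy/visualizer.py | _others_label
-- ===== SOURCE A (Python) =====
-- from typing import Any, Mapping, Sequence, Tuple
--
-- def _others_label(existing_labels: Sequence[str]) -> str:
--     base_label = "Others"
--     if base_label not in existing_labels:
--         return base_label
--     counter = 1
--     candidate = f"{base_label} ({counter})"
--     while candidate in existing_labels:
--         counter += 1
--         candidate = f"{base_label} ({counter})"
--     return candidate
-- ===== SOURCE B (Python) =====
-- def _others_label(existing_labels):
--     if "Others" not in existing_labels:
--         return "Others"
--     # index pass: collect the integer k of every canonical "Others (k)" label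
--     used = set()
--     for label in existing_labels:
--         if label.startswith("Others (") and label.endswith(")") and len(label) > 9:
--             inner = label[8:-1]
--             if inner.isascii() and inner.isdigit() and (inner == "0" or inner[0] != "0"):
--                 used.add(int(inner))
--     # smallest free index: scan the sorted used indices once, stop at the first gap
--     n = 1
--     for k in sorted(used):
--         if k == n:
--             n += 1
--         elif k > n:
--             break
--     return f"Others ({n})"
-- ===== Notes on version B (the rewrite author's own statement) =====
-- stated objective: alternative
-- what changed: B never generates-and-tests candidate labels: one pass extracts the integer k of every canonical 'Others (k)' label into a set, and a single scan of the sorted indices finds the first gap (mex), where A repeatedly regenerates a candidate string and re-scans the whole label list for it.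
import Mathlib
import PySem

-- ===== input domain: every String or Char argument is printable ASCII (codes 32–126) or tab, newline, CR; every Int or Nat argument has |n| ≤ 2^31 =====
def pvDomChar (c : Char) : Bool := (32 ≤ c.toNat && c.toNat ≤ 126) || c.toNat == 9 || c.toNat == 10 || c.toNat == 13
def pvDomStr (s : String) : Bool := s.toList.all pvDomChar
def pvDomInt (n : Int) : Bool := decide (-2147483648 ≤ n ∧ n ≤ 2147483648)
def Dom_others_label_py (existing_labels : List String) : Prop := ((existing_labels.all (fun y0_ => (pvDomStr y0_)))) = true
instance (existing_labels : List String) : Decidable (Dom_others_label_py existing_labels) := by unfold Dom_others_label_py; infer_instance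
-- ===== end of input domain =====

-- B replaces A's generate-and-test loop (regenerate "Others (n)" and rescan the whole list)
-- by one indexing pass that parses the canonical "Others (k)" suffixes into a set of ints and
-- a single sorted scan that returns the first gap; objective: alternative.

-- ===== PORT A =====
-- A's while loop; `fuel` only makes the recursion structural: with
-- fuel = labels.length + 1 the loop always exits before fuel runs out
-- (the candidates for distinct counters are distinct strings).
def othersLoopA (labels : List String) (counter : Int) : Nat → String
  | 0 => "Others (" ++ PySem.Int.toStr counter ++ ")"
  | fuel + 1 =>
    if ("Others (" ++ PySem.Int.toStr counter ++ ")") ∈ labels then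
      othersLoopA labels (counter + 1) fuel
    else
      "Others (" ++ PySem.Int.toStr counter ++ ")"

def others_label_py (existing_labels : List String) : String :=
  if "Others" ∉ existing_labels then "Others"
  else othersLoopA existing_labels 1 (existing_labels.length + 1)

-- ===== PORT B =====
-- int(inner) ported by hand as a digit fold: exact for the nonempty all-ASCII-digit
-- strings the isdigit guard admits (no sign, no space, no underscore possible there).
def digitsVal (cs : List Char) : Nat := cs.foldl (fun a c => 10 * a + (c.toNat - 48)) 0

-- one step of B's indexing pass: add the integer of a canonical "Others (k)" label.
-- Python's `inner.isascii() and inner.isdigit()` is exactly PySem.Str.strIsdigit;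
-- `inner[0] != "0"` is ported on the head of the (nonempty under the guard) suffix.
def collectStep (used : PySem.Set Int) (label : String) : PySem.Set Int :=
  if PySem.Str.startswith label "Others (" = true ∧ PySem.Str.endswith label ")" = true
      ∧ 9 < PySem.Str.len label then
    let inner := PySem.Str.slice label (some 8) (some (-1))
    if PySem.Str.strIsdigit inner = true ∧ (inner = "0" ∨ inner.toList.head? ≠ some '0') then
      PySem.Set.add used ((digitsVal inner.toList : Nat) : Int)
    else used
  else used

-- B's sorted scan `for k in sorted(used): …` with its break, as structural recursion
def mexScan (n : Int) : List Int → Int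
  | [] => n
  | k :: ks => if k = n then mexScan (n + 1) ks else if n < k then n else mexScan n ks

def others_label_py_alt (existing_labels : List String) : String :=
  if "Others" ∉ existing_labels then "Others"
  else
    let used := existing_labels.foldl collectStep PySem.Set.empty
    "Others (" ++ PySem.Int.toStr (mexScan 1 (PySem.List.sorted used (fun x => x) false)) ++ ")"

-- ===== PRECONDITION & SPEC =====
def Spec_others_label_py (existing_labels : List String) (out : String) : Prop := out = others_label_py_alt existing_labels
instance (existing_labels : List String) (out : String) : Decidable (Spec_others_label_py existing_labels out) := by unfold Spec_others_label_py; infer_instance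

-- ===== CLAIM (what is proved, stated in full; the proofs are below) =====
def Claim_equal_others_label_py : Prop := ∀ (existing_labels : List String), Dom_others_label_py existing_labels → Spec_others_label_py existing_labels (others_label_py existing_labels)

-- ===== LEMMAS AND PROOFS =====

-- str(n) is never the empty string
lemma toDigitsCore_ne_nil (b f n : Nat) (acc : List Char) (h : acc ≠ []) :
    Nat.toDigitsCore b f n acc ≠ [] := by
  induction f generalizing n acc with
  | zero => simpa [Nat.toDigitsCore] using h
  | succ f ih =>
    simp only [Nat.toDigitsCore]
    split
    · exact List.cons_ne_nil _ _
    · exact ih _ _ (List.cons_ne_nil _ _)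

lemma toStr_toList_ne_nil (n : Int) : (PySem.Int.toStr n).toList ≠ [] := by
  simp only [PySem.Int.toStr, String.toList_ofList, PySem.Int.toChars]
  split
  · exact List.cons_ne_nil _ _
  · simp only [Nat.toDigits, Nat.toDigitsCore]
    split
    · exact List.cons_ne_nil _ _
    · exact toDigitsCore_ne_nil _ _ _ _ (List.cons_ne_nil _ _)

-- l[8:-1] at list level, for lists of length ≥ 8
lemma slice_8_neg1 (cs : List Char) (h8 : 8 ≤ cs.length) :
    PySem.List.slice cs (some 8) (some (-1)) = (cs.drop 8).dropLast := by
  rw [List.dropLast_eq_take]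
  simp only [PySem.List.slice, PySem.List.clampIdx, List.length_drop]
  norm_num
  split_ifs with h1
  · subst h1; simp at h8
  · congr 1
    · omega
    · rw [show (Int.toNat 8) = 8 from rfl, Nat.min_eq_left h8]

-- B's filter condition holds on every "Others (" ++ s ++ ")" with s nonempty …
lemma cond_of_canonical (s : String) (hs : s.toList ≠ []) :
    PySem.Str.startswith ("Others (" ++ s ++ ")") "Others (" = true
    ∧ PySem.Str.endswith ("Others (" ++ s ++ ")") ")" = true
    ∧ 9 < PySem.Str.len ("Others (" ++ s ++ ")") := by
  have hlen : 0 < s.toList.length := List.length_pos_of_ne_nil hs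
  refine ⟨?_, ?_, ?_⟩
  · rw [PySem.Str.startswith_eq, PySem.Chars.startswith_iff]
    simp only [String.toList_append]
    exact ⟨s.toList ++ ")".toList, by simp⟩
  · rw [PySem.Str.endswith_eq, PySem.Chars.endswith_iff]
    exact ⟨("Others (" ++ s).toList, by simp [String.toList_append]⟩
  · simp only [PySem.Str.len_eq, String.toList_append, List.length_append]
    rw [show ("Others (" : String).toList.length = 8 from rfl,
        show (")" : String).toList.length = 1 from rfl]
    omega

-- conversely any string passing B's filter is "Others (" ++ its slice ++ ")", slice nonempty
lemma canonical_of_cond (l : String)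
    (h : PySem.Str.startswith l "Others (" = true ∧ PySem.Str.endswith l ")" = true
         ∧ 9 < PySem.Str.len l) :
    l = "Others (" ++ PySem.Str.slice l (some 8) (some (-1)) ++ ")"
    ∧ (PySem.Str.slice l (some 8) (some (-1))).toList ≠ [] := by
  obtain ⟨hp, he, hl⟩ := h
  rw [PySem.Str.len_eq] at hl
  rw [PySem.Str.startswith_eq, PySem.Chars.startswith_iff] at hp
  rw [PySem.Str.endswith_eq, PySem.Chars.endswith_iff] at he
  have hlen : 9 < l.toList.length := by exact_mod_cast hl
  obtain ⟨t, ht⟩ := he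
  rw [show (")" : String).toList = [')'] from rfl] at ht
  have hlt : t.length + 1 = l.toList.length := by
    have := congrArg List.length ht
    rw [List.length_append, List.length_cons, List.length_nil] at this
    exact this
  have htlen : 8 ≤ t.length := by omega
  have hslice : (PySem.Str.slice l (some 8) (some (-1))).toList = t.drop 8 := by
    rw [PySem.Str.toList_slice, PySem.Chars.slice_eq_listSlice, slice_8_neg1 _ (by omega)]
    rw [← ht, List.drop_append_of_le_length htlen, List.dropLast_concat]
  have htake : l.toList.take 8 = "Others (".toList := by
    rw [List.prefix_iff_eq_take] at hp
    exact hp.symm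
  constructor
  · rw [← String.toList_inj]
    simp only [String.toList_append, hslice]
    have ht8 : t.take 8 = "Others (".toList := by
      rw [← List.take_append_of_le_length htlen (l₂ := [')']), ht, htake]
    calc l.toList = t ++ [')'] := ht.symm
      _ = (t.take 8 ++ t.drop 8) ++ [')'] := by rw [List.take_append_drop]
      _ = "Others (".toList ++ t.drop 8 ++ [')'] := by rw [ht8]
      _ = "Others (".toList ++ (t.drop 8 ++ (")").toList) := by simp
  · rw [hslice]
    intro hnil
    have := congrArg List.length hnil
    rw [List.length_drop, List.length_nil] at this
    omega

-- decimal digit characters: value, digit-hood, zero-hood, and the inverse direction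
lemma digitChar_facts (d : Nat) (h : d < 10) :
    (Nat.digitChar d).toNat - 48 = d ∧ PySem.Chars.isdigit (Nat.digitChar d) = true
    ∧ (d ≠ 0 → Nat.digitChar d ≠ '0') := by
  interval_cases d <;> exact ⟨rfl, rfl, by decide⟩

lemma digitChar_inv (c : Char) (h : PySem.Chars.isdigit c = true) :
    Nat.digitChar (c.toNat - 48) = c ∧ c.toNat - 48 < 10 := by
  simp only [PySem.Chars.isdigit, Bool.and_eq_true, decide_eq_true_eq, Char.le_def] at h
  have h48 : 48 ≤ c.toNat := h.1
  have h57 : c.toNat ≤ 57 := h.2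
  have : c = Char.ofNat c.toNat := (Char.ofNat_toNat c).symm
  rw [this]
  set i := c.toNat with hi
  interval_cases i <;> exact ⟨by decide, by decide⟩

lemma digitsVal_append (cs : List Char) (c : Char) :
    digitsVal (cs ++ [c]) = 10 * digitsVal cs + (c.toNat - 48) := by
  simp [digitsVal, List.foldl_append]

-- str of a natural number decodes back to it
lemma digitsVal_toDigits (n : Nat) : digitsVal (Nat.toDigits 10 n) = n := by
  induction n using Nat.strong_induction_on with
  | _ n ih =>
    rw [Nat.toDigits_eq_if (by omega)]
    by_cases h : n < 10
    · rw [if_pos h]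
      have := (digitChar_facts n h).1
      simp [digitsVal, this]
    · rw [if_neg h]
      rw [digitsVal_append, ih (n / 10) (by omega), (digitChar_facts (n % 10) (by omega)).1]
      omega

-- str of a natural number consists of digits only
lemma toDigits_all_digits (n : Nat) : ∀ c ∈ Nat.toDigits 10 n, PySem.Chars.isdigit c = true := by
  induction n using Nat.strong_induction_on with
  | _ n ih =>
    rw [Nat.toDigits_eq_if (by omega)]
    by_cases h : n < 10
    · rw [if_pos h]
      intro c hc
      rw [List.mem_singleton] at hc
      exact hc ▸ (digitChar_facts n h).2.1
    · rw [if_neg h]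
      intro c hc
      rcases List.mem_append.mp hc with hc | hc
      · exact ih (n / 10) (by omega) c hc
      · rw [List.mem_singleton] at hc
        exact hc ▸ (digitChar_facts (n % 10) (by omega)).2.1

lemma toDigits_ne_nil (n : Nat) : Nat.toDigits 10 n ≠ [] :=
  List.ne_nil_of_length_pos Nat.length_toDigits_pos

-- str of a positive natural number has no leading zero
lemma toDigits_head_ne_zero (n : Nat) (hn : 0 < n) :
    (Nat.toDigits 10 n).head? ≠ some '0' := by
  induction n using Nat.strong_induction_on with
  | _ n ih =>
    rw [Nat.toDigits_eq_if (by omega)]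
    by_cases h : n < 10
    · rw [if_pos h]
      intro hc
      rw [List.head?_cons, Option.some_inj] at hc
      exact (digitChar_facts n h).2.2 (by omega) hc
    · rw [if_neg h]
      rw [List.head?_append_of_ne_nil _ (toDigits_ne_nil _)]
      exact ih (n / 10) (by omega) (by omega)

-- digit strings with a nonzero head have positive value
lemma digitsVal_pos (c : Char) (cs : List Char) (hd : PySem.Chars.isdigit c = true)
    (hc : c ≠ '0') : 0 < digitsVal (c :: cs) := by
  have hstep : ∀ (l : List Char) (a : Nat), 0 < a →
      0 < l.foldl (fun a c => 10 * a + (c.toNat - 48)) a := by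
    intro l
    induction l with
    | nil => intro a ha; simpa using ha
    | cons x xs ihx => intro a ha; exact ihx (10 * a + (x.toNat - 48)) (by omega)
  have hcv : 0 < c.toNat - 48 := by
    simp only [PySem.Chars.isdigit, Bool.and_eq_true, decide_eq_true_eq, Char.le_def] at hd
    have h48 : 48 ≤ c.toNat := hd.1
    have : c.toNat ≠ 48 := by
      intro h48'
      exact hc (by rw [← Char.ofNat_toNat c, h48'])
    omega
  simpa [digitsVal] using hstep cs (c.toNat - 48) (by omega)

-- canonical decimal strings (digits, no leading zero) are exactly the str(n)
lemma toDigits_digitsVal (cs : List Char) (hne : cs ≠ [])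
    (hdig : ∀ c ∈ cs, PySem.Chars.isdigit c = true)
    (hz : cs = ['0'] ∨ cs.head? ≠ some '0') :
    Nat.toDigits 10 (digitsVal cs) = cs := by
  induction cs using List.reverseRecOn with
  | nil => exact absurd rfl hne
  | append_singleton xs c ihx =>
    by_cases hxs : xs = []
    · subst hxs
      have hd := hdig c (by simp)
      obtain ⟨hinv, hlt⟩ := digitChar_inv c hd
      simp only [List.nil_append]
      rw [show digitsVal [c] = c.toNat - 48 by simp [digitsVal],
          Nat.toDigits_of_lt_base hlt, hinv]
    · obtain ⟨h, t, rfl⟩ := List.exists_cons_of_ne_nil hxs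
      have hhz : h ≠ '0' := by
        rcases hz with hz | hz
        · exfalso
          have := congrArg List.length hz
          simp at this
        · intro hh
          subst hh
          simp at hz
      have hxcanon : Nat.toDigits 10 (digitsVal (h :: t)) = h :: t := by
        refine ihx (by simp) (fun x hx => hdig x ?_) (Or.inr (by simpa using hhz))
        simp only [List.cons_append, List.mem_cons, List.mem_append] at hx ⊢
        tauto
      have hvpos : 0 < digitsVal (h :: t) :=
        digitsVal_pos h t (hdig h (by simp)) hhz
      have hd := hdig c (by simp)
      obtain ⟨hinv, hlt⟩ := digitChar_inv c hd
      rw [digitsVal_append, ← Nat.toDigits_append_toDigits (by omega) hvpos hlt,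
          hxcanon, Nat.toDigits_of_lt_base hlt, hinv]

-- str(k) for 0 ≤ k, at list level
lemma toStr_nonneg (k : Int) (hk : 0 ≤ k) :
    (PySem.Int.toStr k).toList = Nat.toDigits 10 k.toNat := by
  simp [PySem.Int.toStr, PySem.Int.toChars, not_lt.mpr hk]

-- a label passes B's filter with value k exactly when it is the canonical label of k ≥ 0
lemma pass_iff (l : String) (k : Int) :
    ((PySem.Str.startswith l "Others (" = true ∧ PySem.Str.endswith l ")" = true
        ∧ 9 < PySem.Str.len l)
      ∧ (PySem.Str.strIsdigit (PySem.Str.slice l (some 8) (some (-1))) = true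
          ∧ ((PySem.Str.slice l (some 8) (some (-1))) = "0"
              ∨ (PySem.Str.slice l (some 8) (some (-1))).toList.head? ≠ some '0'))
      ∧ ((digitsVal (PySem.Str.slice l (some 8) (some (-1))).toList : Nat) : Int) = k)
    ↔ (0 ≤ k ∧ l = "Others (" ++ PySem.Int.toStr k ++ ")") := by
  constructor
  · rintro ⟨hcond, ⟨hdig, hz⟩, hval⟩
    obtain ⟨hcanon, hne⟩ := canonical_of_cond l hcond
    set cs := (PySem.Str.slice l (some 8) (some (-1))).toList with hcs
    have hk0 : 0 ≤ k := hval ▸ Int.natCast_nonneg _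
    refine ⟨hk0, ?_⟩
    have hdig' : ∀ c ∈ cs, PySem.Chars.isdigit c = true := by
      rw [PySem.Str.strIsdigit_eq, PySem.Chars.strIsdigit, Bool.and_eq_true, List.all_eq_true] at hdig
      exact fun c hc => hdig.2 c hc
    have hz' : cs = ['0'] ∨ cs.head? ≠ some '0' := by
      rcases hz with hz | hz
      · left; rw [hcs, hz]; rfl
      · right; exact hz
    have hround : Nat.toDigits 10 (digitsVal cs) = cs :=
      toDigits_digitsVal cs hne hdig' hz'
    have hts : (PySem.Int.toStr k).toList = cs := by
      rw [toStr_nonneg k hk0, ← hval]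
      simpa using hround
    have : PySem.Int.toStr k = PySem.Str.slice l (some 8) (some (-1)) :=
      String.toList_inj.mp (by rw [hts, hcs])
    rw [hcanon, this]
  · rintro ⟨hk0, rfl⟩
    have hne := toStr_toList_ne_nil k
    have hcond := cond_of_canonical _ hne
    have hslice : PySem.Str.slice ("Others (" ++ PySem.Int.toStr k ++ ")") (some 8) (some (-1))
        = PySem.Int.toStr k := by
      apply String.toList_inj.mp
      rw [PySem.Str.toList_slice, PySem.Chars.slice_eq_listSlice]
      have h8 : 8 ≤ ("Others (" ++ PySem.Int.toStr k ++ ")").toList.length := by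
        simp only [String.toList_append, List.length_append]
        rw [show ("Others (" : String).toList.length = 8 from rfl]
        omega
      rw [slice_8_neg1 _ h8]
      simp only [String.toList_append]
      rw [show ("Others (" : String).toList = ['O','t','h','e','r','s',' ','('] from rfl]
      simp
    refine ⟨hcond, ⟨?_, ?_⟩, ?_⟩
    · rw [hslice, PySem.Str.strIsdigit_eq, PySem.Chars.strIsdigit, toStr_nonneg k hk0]
      rw [Bool.and_eq_true, List.all_eq_true]
      exact ⟨by simp [List.isEmpty_eq_false_iff, toDigits_ne_nil], fun c hc => toDigits_all_digits _ c hc⟩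
    · rw [hslice]
      by_cases hk1 : k = 0
      · left; subst hk1; rfl
      · right
        rw [toStr_nonneg k hk0]
        exact toDigits_head_ne_zero k.toNat (by omega)
    · rw [hslice, toStr_nonneg k hk0, digitsVal_toDigits]
      omega

-- membership in B's index set
lemma mem_collect (labels : List String) : ∀ (s : PySem.Set Int) (k : Int),
    (k ∈ labels.foldl collectStep s ↔
      k ∈ s ∨ (0 ≤ k ∧ ("Others (" ++ PySem.Int.toStr k ++ ")") ∈ labels)) := by
  induction labels with
  | nil => intro s k; simp
  | cons l ls ih =>
    intro s k
    rw [List.foldl_cons, ih]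
    have key : k ∈ collectStep s l ↔
        k ∈ s ∨ (0 ≤ k ∧ l = "Others (" ++ PySem.Int.toStr k ++ ")") := by
      simp only [collectStep]
      split_ifs with h1 h2
      · rw [PySem.Set.mem_add]
        constructor
        · rintro (hk | hk)
          · exact Or.inl hk
          · exact Or.inr ((pass_iff l k).mp ⟨h1, h2, hk.symm⟩)
        · rintro (hk | hk)
          · exact Or.inl hk
          · right
            have := (pass_iff l k).mpr hk
            exact this.2.2.symm
      · constructor
        · exact Or.inl
        · rintro (hk | hk)
          · exact hk
          · exact absurd ((pass_iff l k).mpr hk).2.1 h2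
      · constructor
        · exact Or.inl
        · rintro (hk | hk)
          · exact hk
          · exact absurd ((pass_iff l k).mpr hk).1 h1
    rw [key]
    simp only [List.mem_cons]
    constructor
    · rintro ((hk | hk) | hk)
      · exact Or.inl hk
      · exact Or.inr ⟨hk.1, Or.inl hk.2.symm⟩
      · exact Or.inr ⟨hk.1, Or.inr hk.2⟩
    · rintro (hk | ⟨hk0, hk | hk⟩)
      · exact Or.inl (Or.inl hk)
      · exact Or.inl (Or.inr ⟨hk0, hk.symm⟩)
      · exact Or.inr ⟨hk0, hk⟩

-- the index set stays duplicate-free and grows by at most one per label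
lemma collect_nodup (labels : List String) : ∀ (s : PySem.Set Int), s.Nodup →
    (labels.foldl collectStep s).Nodup := by
  induction labels with
  | nil => intro s hs; simpa using hs
  | cons l ls ih =>
    intro s hs
    rw [List.foldl_cons]
    apply ih
    simp only [collectStep]
    split_ifs with h1 h2
    · exact PySem.Set.nodup_add _ _ hs
    · exact hs
    · exact hs

lemma collect_length_le (labels : List String) : ∀ (s : PySem.Set Int),
    (labels.foldl collectStep s).length ≤ s.length + labels.length := by
  induction labels with
  | nil => intro s; simp
  | cons l ls ih =>
    intro s
    rw [List.foldl_cons]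
    have hstep : (collectStep s l).length ≤ s.length + 1 := by
      simp only [collectStep, PySem.Set.add]
      split_ifs with h1 h2 h3 <;> simp [List.length_append]
    have hrec := ih (collectStep s l)
    simp only [List.length_cons]
    omega

-- B's sorted scan returns the first value ≥ n missing from a strictly increasing list
lemma mexScan_spec (L : List Int) : ∀ (n : Int), L.Pairwise (· < ·) →
    mexScan n L ∉ L ∧ n ≤ mexScan n L ∧ ∀ j, n ≤ j → j < mexScan n L → j ∈ L := by
  induction L with
  | nil =>
    intro n _
    refine ⟨by simp, le_refl n, fun j hj hj' => ?_⟩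
    exact absurd (show (j : Int) < n by simpa [mexScan] using hj') (by omega)
  | cons k ks ih =>
    intro n hp
    have hks := (List.pairwise_cons.mp hp).2
    have hklt := (List.pairwise_cons.mp hp).1
    by_cases hk : k = n
    · subst hk
      obtain ⟨hnotin, hle, hall⟩ := ih (k + 1) hks
      rw [show mexScan k (k :: ks) = mexScan (k + 1) ks by simp [mexScan]]
      refine ⟨?_, by omega, ?_⟩
      · rw [List.mem_cons]
        rintro (h | h)
        · omega
        · exact hnotin h
      · intro j hj hj'
        rw [List.mem_cons]
        by_cases hjk : j = k
        · exact Or.inl hjk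
        · exact Or.inr (hall j (by omega) hj')
    · by_cases hnk : n < k
      · rw [show mexScan n (k :: ks) = n by simp [mexScan, hk, hnk]]
        refine ⟨?_, le_refl n, fun j hj hj' => by omega⟩
        rw [List.mem_cons]
        rintro (h | h)
        · omega
        · exact absurd (hklt n h) (by omega)
      · have hkn : k < n := by omega
        obtain ⟨hnotin, hle, hall⟩ := ih n hks
        rw [show mexScan n (k :: ks) = mexScan n ks by simp [mexScan, hk, not_lt.mpr (le_of_lt hkn)]]
        refine ⟨?_, hle, ?_⟩
        · rw [List.mem_cons]
          rintro (h | h)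
          · omega
          · exact hnotin h
        · intro j hj hj'
          exact List.mem_cons_of_mem _ (hall j hj hj')

-- A's loop lands exactly on the first missing index
lemma loopA_eq (labels : List String) : ∀ (fuel : Nat) (n m : Int), n ≤ m → m ≤ n + fuel →
    ("Others (" ++ PySem.Int.toStr m ++ ")") ∉ labels →
    (∀ j, n ≤ j → j < m → ("Others (" ++ PySem.Int.toStr j ++ ")") ∈ labels) →
    othersLoopA labels n fuel = "Others (" ++ PySem.Int.toStr m ++ ")" := by
  intro fuel
  induction fuel with
  | zero =>
    intro n m h1 h2 _ _
    have : m = n := by omega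
    subst this
    rfl
  | succ fuel ih =>
    intro n m h1 h2 hm hall
    by_cases hc : ("Others (" ++ PySem.Int.toStr n ++ ")") ∈ labels
    · have hne : n ≠ m := by
        intro h
        exact hm (h ▸ hc)
      rw [show othersLoopA labels n (fuel + 1) = othersLoopA labels (n + 1) fuel by
            simp [othersLoopA, hc]]
      exact ih (n + 1) m (by omega) (by omega) hm (fun j hj hj' => hall j (by omega) hj')
    · have : m = n := by
        by_contra h
        exact hc (hall n (le_refl n) (by omega))
      subst this
      simp [othersLoopA, hc]

-- ===== VERDICT (by name: the statement is the Claim_ definition above) =====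
theorem others_label_py_spec : Claim_equal_others_label_py := by
  intro labels _
  unfold Spec_others_label_py others_label_py others_label_py_alt
  by_cases hb : "Others" ∈ labels
  · simp only [hb, not_true_eq_false, if_false]
    set used := labels.foldl collectStep PySem.Set.empty with hused
    set L := PySem.List.sorted used (fun x => x) false with hL
    have hperm : L.Perm used := PySem.List.sorted_perm _ _ _
    have hnodupU : used.Nodup := collect_nodup labels PySem.Set.empty (by simp [PySem.Set.empty])
    have hnodupL : L.Nodup := hperm.symm.nodup hnodupU
    have hpairL : L.Pairwise (· < ·) := by
      have h1 : L.Pairwise (· ≤ ·) := PySem.List.sorted_pairwise used (fun x => x)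
      have h2 : L.Pairwise (· ≠ ·) := hnodupL
      exact (h1.and h2).imp (fun h => lt_of_le_of_ne h.1 h.2)
    set m := mexScan 1 L with hm
    obtain ⟨hnotin, h1m, hall⟩ := mexScan_spec L 1 hpairL
    have hmemL : ∀ j : Int, j ∈ L ↔ j ∈ used := fun j => hperm.mem_iff
    have hmemU : ∀ j : Int, j ∈ used ↔
        (0 ≤ j ∧ ("Others (" ++ PySem.Int.toStr j ++ ")") ∈ labels) := by
      intro j
      rw [hused, mem_collect labels PySem.Set.empty j]
      simp [PySem.Set.empty]
    -- fuel bound: the interval [1, m) sits inside the duplicate-free list L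
    have hsub : Finset.Icc (1 : Int) (m - 1) ⊆ L.toFinset := by
      intro j hj
      rw [Finset.mem_Icc] at hj
      rw [List.mem_toFinset]
      exact hall j hj.1 (by omega)
    have hcard : (m - 1).toNat ≤ L.length := by
      have := Finset.card_le_card hsub
      rw [Int.card_Icc, List.toFinset_card_of_nodup hnodupL] at this
      omega
    have hLlen : L.length = used.length := hperm.length_eq
    have hUlen : used.length ≤ labels.length := by
      have := collect_length_le labels PySem.Set.empty
      simpa [PySem.Set.empty] using this
    have hmbound : m ≤ 1 + (labels.length + 1 : Nat) := by
      have : (m - 1).toNat ≤ labels.length := by omega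
      omega
    apply loopA_eq labels (labels.length + 1) 1 m h1m (by exact_mod_cast hmbound)
    · intro hmem
      exact hnotin ((hmemL m).mpr ((hmemU m).mpr ⟨by omega, hmem⟩))
    · intro j hj hj'
      exact ((hmemU j).mp ((hmemL j).mp (hall j hj hj'))).2
  · simp [hb]
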